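-- pv_equiv track=rewrite | github.com/zhjlee11/Baekjoon | 16496.py | getGreedList
-- ===== SOURCE A (Python) =====
-- def compare(a, b):
--     if a==b:
--         return None
--     return int(str(a)+str(b)) > int(str(b)+str(a))
--
-- def getGreedList(components):
--     greed_list = [0 for _ in range(len(components))]
--
--     for i, a in enumerate(components):
--         for j, b in enumerate(components):
--             if i!=j:
--                 comp = compare(a, b)
--                 if comp == False:
--                     greed_list[j] += 1
--
--     return greed_list
-- ===== SOURCE B (Python) =====
-- def getGreedList(components):
--     # Count occurrences of each distinct value once, compare distinct values
--     # pairwise once, then map each element to its precomputed count.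
--     cnt = {}
--     for x in components:
--         cnt[x] = cnt.get(x, 0) + 1
--     memo = {}
--     for x in cnt:
--         total = 0
--         for y, c in cnt.items():
--             if y != x and int(str(y) + str(x)) <= int(str(x) + str(y)):
--                 total += c
--         memo[x] = total
--     return [memo[x] for x in components]
-- ===== Notes on version B (the rewrite author's own statement) =====
-- stated objective: faster
-- what changed: B replaces A's double loop over positions (n^2 pairwise compare calls updating a positional array) by a value counter: each distinct value's count is computed once from pairwise comparisons of distinct values, then every element is mapped to its precomputed count, O(n + d^2 * L) for d distinct values instead of O(n^2 * L).
import Mathlib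
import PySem

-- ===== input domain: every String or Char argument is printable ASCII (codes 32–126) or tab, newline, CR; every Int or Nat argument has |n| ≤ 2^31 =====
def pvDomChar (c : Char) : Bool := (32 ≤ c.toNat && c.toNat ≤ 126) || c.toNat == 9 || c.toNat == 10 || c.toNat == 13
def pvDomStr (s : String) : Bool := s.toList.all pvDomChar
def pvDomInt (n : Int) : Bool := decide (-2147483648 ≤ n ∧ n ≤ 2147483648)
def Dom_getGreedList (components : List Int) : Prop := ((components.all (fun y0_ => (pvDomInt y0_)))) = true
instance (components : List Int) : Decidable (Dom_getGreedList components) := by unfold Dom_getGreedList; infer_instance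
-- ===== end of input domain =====

-- B replaces A's double loop over positions by a per-distinct-value counter: comparisons run
-- once per pair of distinct VALUES and each element is mapped to its precomputed count.

-- ===== PORT A =====
-- int(str(a) ++ str(b)); inside Pre_ the concatenation always parses (ofStr? = some), the
-- `.getD 0` default is never reached there (outside Pre_ Python raises ValueError).
def pyCat (a b : Int) : Int :=
  (PySem.Int.ofStr? (PySem.Int.toStr a ++ PySem.Int.toStr b)).getD 0

-- compare(a, b): None for a == b, else the bool int(str(a)+str(b)) > int(str(b)+str(a))
def pyCompare (a b : Int) : Option Bool :=
  if a = b then none else some (decide (pyCat a b > pyCat b a))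

def getGreedList (components : List Int) : List Int :=
  let greed0 : List Int := (List.range components.length).map (fun _ => (0 : Int))
  (PySem.List.enumerate components 0).foldl
    (fun gl ia =>
      (PySem.List.enumerate components 0).foldl
        (fun gl jb =>
          if ia.1 ≠ jb.1 then
            if pyCompare ia.2 jb.2 = some false then
              -- greed_list[j] += 1 ; j comes from enumerate, always a valid index
              gl.set jb.1.toNat (gl.getD jb.1.toNat 0 + 1)
            else gl
          else gl)
        gl)
    greed0

-- ===== PORT B =====
def getGreedList_alt (components : List Int) : List Int :=
  let cnt : PySem.Dict Int Int :=
    components.foldl (fun d x => d.insert x (d.getD x 0 + 1)) PySem.Dict.empty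
  let memo : PySem.Dict Int Int :=
    cnt.keys.foldl
      (fun m x =>
        m.insert x
          (cnt.items.foldl
            (fun t yc => if yc.1 ≠ x ∧ pyCat yc.1 x ≤ pyCat x yc.1 then t + yc.2 else t)
            0))
      PySem.Dict.empty
  -- memo[x]: x is always a key of memo, so the KeyError default 0 is never reached
  components.map (fun x => memo.getD x 0)

-- ===== PRECONDITION & SPEC =====
-- Pre_ excludes exactly the inputs on which Python A raises ValueError: compare concatenates
-- str(a)+str(b), which int() cannot parse as soon as two distinct values occur with some value
-- negative (the '-' lands mid-string); so A returns iff all values are nonnegative or all equal.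
def Pre_getGreedList (components : List Int) : Prop :=
  (∀ x ∈ components, 0 ≤ x) ∨ (∀ x ∈ components, ∀ y ∈ components, x = y)
instance (components : List Int) : Decidable (Pre_getGreedList components) := by
  unfold Pre_getGreedList; infer_instance

def pvWitness_getGreedList : List Int := [10, 2, 10, 21]

def Spec_getGreedList (components : List Int) (out : List Int) : Prop := out = getGreedList_alt components
instance (components : List Int) (out : List Int) : Decidable (Spec_getGreedList components out) := by unfold Spec_getGreedList; infer_instance

-- ===== CLAIM (what is proved, stated in full; the proofs are below) =====
def Claim_equal_getGreedList : Prop := ∀ (components : List Int), Dom_getGreedList components → Pre_getGreedList components → Spec_getGreedList components (getGreedList components)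

-- ===== LEMMAS AND PROOFS =====

-- the comparison both programs make: y precedes-or-ties x (comp == False on A's side)
def pvCond (y x : Int) : Bool := decide (y ≠ x) && decide (pyCat y x ≤ pyCat x y)

-- the common value: element x's count over the whole list
def pvG (cs : List Int) (x : Int) : Int := (cs.countP (fun y => pvCond y x) : Int)

-- pyCompare a b = some false is exactly pvCond a b
theorem pyCompare_some_false (a b : Int) :
    (pyCompare a b = some false) ↔ pvCond a b = true := by
  unfold pyCompare pvCond
  by_cases h : a = b
  · simp [h]
  · simp [h]

-- inner pass of A: folding the set-increment over enumerate cs s is a zipWith on the drop-s part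
theorem inner_pass (p : Int → Bool) (cs : List Int) : ∀ (s : Nat) (gl : List Int),
    s + cs.length ≤ gl.length →
    (PySem.List.enumerate cs (s : Int)).foldl
      (fun g jb => if p jb.2 then g.set jb.1.toNat (g.getD jb.1.toNat 0 + 1) else g) gl
    = gl.take s ++ List.zipWith (fun g c => if p c then g + 1 else g) (gl.drop s) cs
        ++ gl.drop (s + cs.length) := by
  induction cs with
  | nil => intro s gl h; simp
  | cons c cs ih =>
    intro s gl h
    simp only [List.length_cons] at h
    have hs : s < gl.length := by omega
    rw [PySem.List.enumerate_cons]
    simp only [List.foldl_cons]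
    have hgd : gl.getD s 0 = gl[s] := List.getD_eq_getElem gl 0 hs
    have hstep : (if p c then gl.set ((s : Int)).toNat (gl.getD ((s : Int)).toNat 0 + 1) else gl)
        = gl.set s (if p c then gl.getD s 0 + 1 else gl.getD s 0) := by
      by_cases hp : p c
      · simp [hp]
      · simp only [if_neg hp, hgd, List.set_getElem_self]
    rw [hstep]
    have hcast : ((s : Int)) + 1 = ((s + 1 : Nat) : Int) := by push_cast; ring
    rw [hcast, ih (s + 1) _ (by simp; omega)]
    set v := (if p c then gl.getD s 0 + 1 else gl.getD s 0) with hv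
    have htake : (gl.set s v).take (s + 1) = gl.take s ++ [v] := by
      rw [List.take_add_one, List.take_set]
      rw [List.set_eq_of_length_le (l := gl.take s) (by simp)]
      congr 1
      simp [hs]
    have hdrop1 : (gl.set s v).drop (s + 1) = gl.drop (s + 1) :=
      List.drop_set_of_lt (by omega)
    have hdrop2 : (gl.set s v).drop (s + 1 + cs.length) = gl.drop (s + 1 + cs.length) :=
      List.drop_set_of_lt (by omega)
    rw [htake, hdrop1, hdrop2]
    have hdcons : gl.drop s = gl[s] :: gl.drop (s + 1) := by
      rw [List.drop_eq_getElem_cons hs]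
    rw [hdcons]
    simp only [List.zipWith_cons_cons]
    have hvv : (if p c then gl[s] + 1 else gl[s]) = v := by rw [hv, hgd]
    rw [hvv]
    have hidx : s + (c :: cs).length = s + 1 + cs.length := by simp; omega
    rw [hidx]
    simp [List.append_assoc]

-- zipWith over a mapped copy of the same list is a map
theorem zipWith_map_self (f : Int → Int → Int) (c : Int → Int) (cs : List Int) :
    List.zipWith f (cs.map c) cs = cs.map (fun x => f (c x) x) := by
  induction cs with
  | nil => rfl
  | cons x cs ih => simp [ih]

-- A's inner fold on a full-length state, at offset 0
theorem inner_apply (a : Int) (cs gl : List Int) (hlen : gl.length = cs.length) :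
    (PySem.List.enumerate cs 0).foldl
      (fun g jb => if pvCond a jb.2 then g.set jb.1.toNat (g.getD jb.1.toNat 0 + 1) else g) gl
    = List.zipWith (fun g x => if pvCond a x then g + 1 else g) gl cs := by
  have h := inner_pass (fun b => pvCond a b) cs 0 gl (by omega)
  simp only [Nat.cast_zero] at h
  rw [h]
  simp [hlen]

-- a fold over enumerate whose body only uses the element is a fold over the list
theorem foldl_enum_snd (H : Int → List Int → List Int) : ∀ (ds : List Int) (s : Int) (init : List Int),
    (PySem.List.enumerate ds s).foldl (fun gl ia => H ia.2 gl) init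
    = ds.foldl (fun gl a => H a gl) init := by
  intro ds
  induction ds with
  | nil => intro s init; simp
  | cons d ds ih => intro s init; rw [PySem.List.enumerate_cons]; simp only [List.foldl_cons, ih]

-- outer loop of A: each pass adds the 0/1 indicator pointwise to the map-shaped state
theorem outer_full (cs : List Int) : ∀ (P : List Int) (c : Int → Int),
    P.foldl
      (fun gl a =>
        (PySem.List.enumerate cs 0).foldl
          (fun g jb => if pvCond a jb.2 then g.set jb.1.toNat (g.getD jb.1.toNat 0 + 1) else g) gl)
      (cs.map c)
    = cs.map (fun x => c x + (P.countP (fun y => pvCond y x) : Int)) := by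
  intro P
  induction P with
  | nil => intro c; simp
  | cons a P ih =>
    intro c
    rw [List.foldl_cons, inner_apply a cs _ (by simp), zipWith_map_self]
    have hmid : (cs.map fun x => (fun g x => if pvCond a x then g + 1 else g) (c x) x)
        = cs.map (fun x => c x + (if pvCond a x then 1 else 0)) := by
      apply List.map_congr_left; intro x _
      by_cases h : pvCond a x <;> simp [h]
    rw [hmid, ih]
    apply List.map_congr_left; intro x _
    rw [List.countP_cons]
    by_cases h : pvCond a x
    · simp [h]
      ring
    · simp [h]

theorem getGreedList_eq_map (cs : List Int) : getGreedList cs = cs.map (pvG cs) := by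
  unfold getGreedList
  -- remove the i ≠ j guard and rewrite the comparison into pvCond
  have hcongr : (PySem.List.enumerate cs 0).foldl
      (fun gl ia =>
        (PySem.List.enumerate cs 0).foldl
          (fun gl jb =>
            if ia.1 ≠ jb.1 then
              if pyCompare ia.2 jb.2 = some false then
                gl.set jb.1.toNat (gl.getD jb.1.toNat 0 + 1)
              else gl
            else gl) gl)
      ((List.range cs.length).map (fun _ => (0 : Int)))
    = (PySem.List.enumerate cs 0).foldl
      (fun gl ia =>
        (PySem.List.enumerate cs 0).foldl
          (fun g jb =>
            if pvCond ia.2 jb.2 then g.set jb.1.toNat (g.getD jb.1.toNat 0 + 1) else g) gl)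
      ((List.range cs.length).map (fun _ => (0 : Int))) := by
    apply PySem.List.foldl_congr_mem
    intro acc ia hia
    apply PySem.List.foldl_congr_mem
    intro acc2 jb hjb
    rw [PySem.List.mem_enumerate_iff] at hia hjb
    obtain ⟨k, hk, rfl⟩ := hia
    obtain ⟨m, hm, rfl⟩ := hjb
    by_cases hkm : (0 + (k : Int)) = (0 + (m : Int))
    · have : (k : Int) = (m : Int) := by omega
      have hkm' : k = m := by exact_mod_cast this
      subst hkm'
      have hrefl : pvCond cs[k] cs[k] = false := by unfold pvCond; simp
      simp [hrefl]
    · simp only [hkm, ne_eq, not_false_eq_true, if_true]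
      by_cases h : pyCompare cs[k] cs[m] = some false
      · rw [if_pos h, if_pos ((pyCompare_some_false _ _).mp h)]
      · rw [if_neg h, if_neg (fun hc => h ((pyCompare_some_false _ _).mpr hc))]
  rw [hcongr]
  have hinit : (List.range cs.length).map (fun _ => (0 : Int)) = cs.map (fun _ => (0 : Int)) := by
    rw [List.map_const', List.map_const']; simp
  rw [hinit]
  have henum : (PySem.List.enumerate cs 0).foldl
      (fun gl ia =>
        (PySem.List.enumerate cs 0).foldl
          (fun g jb =>
            if pvCond ia.2 jb.2 then g.set jb.1.toNat (g.getD jb.1.toNat 0 + 1) else g) gl)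
      (cs.map (fun _ => (0 : Int)))
    = cs.foldl
      (fun gl a =>
        (PySem.List.enumerate cs 0).foldl
          (fun g jb =>
            if pvCond a jb.2 then g.set jb.1.toNat (g.getD jb.1.toNat 0 + 1) else g) gl)
      (cs.map (fun _ => (0 : Int))) :=
    foldl_enum_snd
      (fun a gl =>
        (PySem.List.enumerate cs 0).foldl
          (fun g jb =>
            if pvCond a jb.2 then g.set jb.1.toNat (g.getD jb.1.toNat 0 + 1) else g) gl)
      cs 0 (cs.map (fun _ => (0 : Int)))
  rw [henum, outer_full cs cs (fun _ => (0 : Int))]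
  apply List.map_congr_left; intro x _
  unfold pvG
  ring

-- the per-distinct-value total B stores in memo[x]
def pvS (cs : List Int) (x : Int) : Int :=
  (PySem.Dict.counter cs).items.foldl
    (fun t yc => if yc.1 ≠ x ∧ pyCat yc.1 x ≤ pyCat x yc.1 then t + yc.2 else t) 0

-- an indicator summed over a Nodup list containing z picks out z's term
theorem sum_indicator_not_mem (p : Int → Bool) (z : Int) :
    ∀ d : List Int, z ∉ d →
    (d.map (fun k => if p k ∧ k = z then (1 : Int) else 0)).sum = 0 := by
  intro d
  induction d with
  | nil => intro _; simp
  | cons k d ih =>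
    intro hz
    simp only [List.map_cons, List.sum_cons, List.mem_cons] at *
    rw [if_neg (fun h => hz (Or.inl h.2.symm)), ih (fun h => hz (Or.inr h))]
    ring

theorem sum_indicator (p : Int → Bool) (z : Int) :
    ∀ d : List Int, d.Nodup → z ∈ d →
    (d.map (fun k => if p k ∧ k = z then (1 : Int) else 0)).sum
      = if p z then (1 : Int) else 0 := by
  intro d
  induction d with
  | nil => intro _ h; cases h
  | cons k d ih =>
    intro hnd hz
    rw [List.nodup_cons] at hnd
    simp only [List.map_cons, List.sum_cons]
    rcases List.mem_cons.mp hz with h | h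
    · subst h
      rw [sum_indicator_not_mem p z d hnd.1]
      by_cases hp : p z
      · rw [if_pos ⟨hp, rfl⟩, if_pos hp]; ring
      · rw [if_neg (fun h => hp h.1), if_neg hp]; ring
    · have hkz : k ≠ z := fun he => hnd.1 (he ▸ h)
      rw [if_neg (fun he => hkz he.2), ih hnd.2 h]
      ring

-- summing counts of the distinct values that satisfy p counts p over the list
theorem sum_count_dedup (p : Int → Bool) (d : List Int) (hnd : d.Nodup) :
    ∀ cs : List Int, (∀ y ∈ cs, y ∈ d) →
    (d.map (fun k => if p k then (cs.count k : Int) else 0)).sum = (cs.countP p : Int) := by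
  intro cs
  induction cs with
  | nil => intro _; simp
  | cons z cs ih =>
    intro hsub
    have hz : z ∈ d := hsub z List.mem_cons_self
    have hsub' : ∀ y ∈ cs, y ∈ d := fun y hy => hsub y (List.mem_cons_of_mem z hy)
    have hterm : (d.map (fun k => if p k then ((z :: cs).count k : Int) else 0))
        = d.map (fun k => (if p k then (cs.count k : Int) else 0)
            + (if p k ∧ k = z then (1 : Int) else 0)) := by
      apply List.map_congr_left; intro k _
      rw [List.count_cons]
      by_cases hp : p k
      · by_cases hkz : k = z
        · subst hkz
          simp [hp]
        · have hno : ¬(p k = true ∧ k = z) := fun h => hkz h.2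
          have hzk : ¬z = k := fun h => hkz h.symm
          simp [hp, hkz, hzk]
      · simp [hp]
    rw [hterm, PySem.List.sum_map_add_int, ih hsub', sum_indicator p z d hnd hz,
      List.countP_cons]
    by_cases hp : p z
    · push_cast
      simp [hp]
    · simp [hp]

-- B's inner items-fold over the counter computes pvG
theorem pvS_eq (cs : List Int) (x : Int) : pvS cs x = pvG cs x := by
  unfold pvS
  rw [PySem.Dict.items_counter, List.foldl_map]
  dsimp only
  have hcong : (fun (t : Int) (k : Int) =>
      if k ≠ x ∧ pyCat k x ≤ pyCat x k then t + (cs.count k : Int) else t)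
      = (fun t k => t + (if pvCond k x then (cs.count k : Int) else 0)) := by
    funext t k
    unfold pvCond
    by_cases h : k ≠ x ∧ pyCat k x ≤ pyCat x k
    · rw [if_pos h, if_pos (by simp [h.1, h.2])]
    · rw [if_neg h, if_neg (by intro hc; simp at hc; exact h ⟨hc.1, hc.2⟩)]
      ring
  rw [hcong, PySem.List.foldl_add]
  rw [sum_count_dedup (fun k => pvCond k x) (PySem.Set.ofList cs) (PySem.Set.nodup_ofList cs)
    cs (fun y hy => (PySem.Set.mem_ofList cs y).mpr hy)]
  unfold pvG
  ring

theorem getGreedList_alt_eq_map (cs : List Int) : getGreedList_alt cs = cs.map (pvG cs) := by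
  unfold getGreedList_alt
  simp only [PySem.Dict.foldl_insert_getD_add_one_eq_counter]
  have hrw : (fun (m : PySem.Dict Int Int) (x : Int) =>
      m.insert x ((PySem.Dict.counter cs).items.foldl
        (fun t yc => if yc.1 ≠ x ∧ pyCat yc.1 x ≤ pyCat x yc.1 then t + yc.2 else t) 0))
      = (fun m x => m.insert x (pvS cs x)) := rfl
  rw [hrw]
  have hfresh : ((PySem.Dict.counter cs).keys.foldl
      (fun m x => m.insert x (pvS cs x)) PySem.Dict.empty).items
      = PySem.Dict.empty.items
        ++ (PySem.Dict.counter cs).keys.map (fun a => (a, pvS cs a)) :=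
    PySem.Dict.items_foldl_insert_fresh _ (fun a => a) (pvS cs) _
      (fun a _ => PySem.Dict.contains_empty a)
      (by simp)
  have hnodup : ((PySem.Dict.counter cs).keys.foldl
      (fun m x => m.insert x (pvS cs x)) PySem.Dict.empty).keys.Nodup :=
    PySem.Dict.nodup_keys_foldl_insert _ _ _ PySem.Dict.nodup_keys_empty
  apply List.map_congr_left
  intro x hx
  have hxk : x ∈ (PySem.Dict.counter cs).keys := by
    rw [PySem.Dict.keys_counter]
    exact (PySem.Set.mem_ofList cs x).mpr hx
  have hmem : (x, pvS cs x) ∈ (PySem.Dict.empty.items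
      ++ (PySem.Dict.counter cs).keys.map (fun a => (a, pvS cs a))) := by
    simp only [List.mem_append]
    right
    exact List.mem_map_of_mem hxk
  have hmem' : (x, pvS cs x) ∈ ((PySem.Dict.counter cs).keys.foldl
      (fun m x => m.insert x (pvS cs x)) PySem.Dict.empty).items := by
    rw [hfresh]; exact hmem
  rw [PySem.Dict.getD_of_mem_items _ hmem' hnodup 0, pvS_eq]

-- ===== VERDICT (by name: the statement is the Claim_ definition above) =====
theorem getGreedList_spec : Claim_equal_getGreedList := by
  intro components _ _
  unfold Spec_getGreedList
  rw [getGreedList_eq_map, getGreedList_alt_eq_map]
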